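-- pv_equiv track=rewrite | github.com/StandardRL-Components/GamesSample | games_0_set_2/game_01810.py | _get_line_cells
-- ===== SOURCE A (Python) =====
-- def _get_line_cells(start, end):
--     (r1, c1), (r2, c2) = start, end
--     dr, dc = abs(r2 - r1), abs(c2 - c1)
--     sr = 1 if r2 > r1 else -1
--     sc = 1 if c2 > c1 else -1
--
--     # Check if line is valid (horizontal, vertical, or 45-degree diagonal)
--     if not (r1 == r2 or c1 == c2 or dr == dc):
--         return [(r1, c1)] # Return only start point for invalid lines
--
--     cells = []
--     err = dr - dc
--     r, c = r1, c1
--     while True: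
--         cells.append((r, c))
--         if r == r2 and c == c2:
--             break
--         e2 = 2 * err
--         if e2 > -dc:
--             err -= dc
--             r += sr
--         if e2 < dr:
--             err += dr
--             c += sc
--     return cells
-- ===== SOURCE B (Python) =====
-- def _get_line_cells(start, end):
--     (r1, c1), (r2, c2) = start, end
--     if not (r1 == r2 or c1 == c2 or abs(r2 - r1) == abs(c2 - c1)):
--         return [(r1, c1)]  # invalid line: only the start point
--     steps = max(abs(r2 - r1), abs(c2 - c1))
--     if steps == 0:
--         return [(r1, c1)]
--     rs = (r2 - r1) // steps
--     cs = (c2 - c1) // steps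
--     return [(r1 + i * rs, c1 + i * cs) for i in range(steps + 1)]
-- ===== Notes on version B (the rewrite author's own statement) =====
-- stated objective: simpler
-- what changed: Replaces the incremental Bresenham error-term walk with a closed-form enumeration: compute steps = max(|dr|,|dc|) and per-step increments by exact integer division, then emit the cells with a single list comprehension.
import Mathlib
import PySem

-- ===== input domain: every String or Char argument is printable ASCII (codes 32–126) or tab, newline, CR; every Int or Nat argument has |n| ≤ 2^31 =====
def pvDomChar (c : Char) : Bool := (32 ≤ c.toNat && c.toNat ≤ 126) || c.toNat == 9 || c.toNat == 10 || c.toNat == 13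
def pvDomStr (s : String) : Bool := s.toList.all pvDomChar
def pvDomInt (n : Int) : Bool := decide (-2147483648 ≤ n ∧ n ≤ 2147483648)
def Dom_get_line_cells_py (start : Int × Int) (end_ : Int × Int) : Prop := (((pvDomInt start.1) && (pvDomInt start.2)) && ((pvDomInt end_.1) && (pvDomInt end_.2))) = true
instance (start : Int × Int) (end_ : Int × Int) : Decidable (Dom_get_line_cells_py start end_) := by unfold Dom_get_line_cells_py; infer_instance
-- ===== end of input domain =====

-- B replaces A's incremental Bresenham error-term walk by a closed-form enumeration
-- (steps = max(|dr|,|dc|), exact per-step increments, one list comprehension); objective: simpler.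

-- ===== PORT A =====
-- A's `while True` walk; fuel bounds the iterations (max(dr,dc)+1 always suffices on the
-- inputs that reach the loop, proved below); fuel exhaustion returns the accumulated cells.
def pvLoopA (r2 c2 dr dc sr sc : Int) : Nat → Int → Int → Int → List (Int × Int) → List (Int × Int)
  | 0, _, _, _, cells => cells
  | fuel + 1, err, r, c, cells =>
    let cells' := cells ++ [(r, c)]
    if r = r2 ∧ c = c2 then cells'
    else
      let e2 := 2 * err
      let err1 := if e2 > -dc then err - dc else err
      let r' := if e2 > -dc then r + sr else r
      let err2 := if e2 < dr then err1 + dr else err1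
      let c' := if e2 < dr then c + sc else c
      pvLoopA r2 c2 dr dc sr sc fuel err2 r' c' cells'

def get_line_cells_py (start : Int × Int) (end_ : Int × Int) : List (Int × Int) :=
  let r1 := start.1; let c1 := start.2
  let r2 := end_.1; let c2 := end_.2
  let dr := |r2 - r1|; let dc := |c2 - c1|
  let sr : Int := if r2 > r1 then 1 else -1
  let sc : Int := if c2 > c1 then 1 else -1
  if ¬(r1 = r2 ∨ c1 = c2 ∨ dr = dc) then [(r1, c1)]
  else pvLoopA r2 c2 dr dc sr sc ((max dr dc).toNat + 1) (dr - dc) r1 c1 []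

-- ===== PORT B =====
def get_line_cells_py_alt (start : Int × Int) (end_ : Int × Int) : List (Int × Int) :=
  let r1 := start.1; let c1 := start.2
  let r2 := end_.1; let c2 := end_.2
  if ¬(r1 = r2 ∨ c1 = c2 ∨ |r2 - r1| = |c2 - c1|) then [(r1, c1)]
  else
    let steps := max (|r2 - r1|) (|c2 - c1|)
    if steps = 0 then [(r1, c1)]
    else
      let rs := PySem.Int.floordiv (r2 - r1) steps
      let cs := PySem.Int.floordiv (c2 - c1) steps
      (PySem.List.pyRange 0 (steps + 1) 1).map (fun i => (r1 + i * rs, c1 + i * cs))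

-- ===== PRECONDITION & SPEC =====
def Spec_get_line_cells_py (start : Int × Int) (end_ : Int × Int) (out : List (Int × Int)) : Prop := out = get_line_cells_py_alt start end_
instance (start : Int × Int) (end_ : Int × Int) (out : List (Int × Int)) : Decidable (Spec_get_line_cells_py start end_ out) := by unfold Spec_get_line_cells_py; infer_instance

-- ===== CLAIM (what is proved, stated in full; the proofs are below) =====
def Claim_equal_get_line_cells_py : Prop := ∀ (start : Int × Int) (end_ : Int × Int), Dom_get_line_cells_py start end_ → Spec_get_line_cells_py start end_ (get_line_cells_py start end_)

-- ===== LEMMAS AND PROOFS =====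

-- On the inputs that reach it, A's loop keeps `err` invariant and moves (r, c) linearly:
-- each iteration adds (rs, cs), so the walk is the closed-form enumeration.
theorem pvLoopA_linear (dr dc sr sc err rs cs : Int)
    (hr : rs = if 2 * err > -dc then sr else 0)
    (hc : cs = if 2 * err < dr then sc else 0)
    (herr : (if 2 * err > -dc then err - dc else err) + (if 2 * err < dr then dr else 0) = err)
    (hne : rs ≠ 0 ∨ cs ≠ 0) :
    ∀ (n fuel : Nat), n < fuel → ∀ (r c : Int) (cells : List (Int × Int)),
      pvLoopA (r + rs * n) (c + cs * n) dr dc sr sc fuel err r c cells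
        = cells ++ (List.range (n + 1)).map (fun i : Nat => (r + rs * (i : Int), c + cs * (i : Int))) := by
  intro n
  induction n with
  | zero =>
    intro fuel hf r c cells
    obtain ⟨f, rfl⟩ : ∃ f, fuel = f + 1 := ⟨fuel - 1, by omega⟩
    simp [pvLoopA]
  | succ n ih =>
    intro fuel hf r c cells
    obtain ⟨f, rfl⟩ : ∃ f, fuel = f + 1 := ⟨fuel - 1, by omega⟩
    have hstop : ¬(r = r + rs * ((n : Int) + 1) ∧ c = c + cs * ((n : Int) + 1)) := by
      rcases hne with h | h
      · intro ⟨h1, _⟩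
        have : rs * ((n : Int) + 1) = 0 := by linarith
        rcases mul_eq_zero.mp this with h' | h' <;> [exact h h'; omega]
      · intro ⟨_, h2⟩
        have : cs * ((n : Int) + 1) = 0 := by linarith
        rcases mul_eq_zero.mp this with h' | h' <;> [exact h h'; omega]
    have hr' : (if 2 * err > -dc then r + sr else r) = r + rs := by
      rw [hr]; split <;> simp
    have hc' : (if 2 * err < dr then c + sc else c) = c + cs := by
      rw [hc]; split <;> simp
    have herr' : (if 2 * err < dr then (if 2 * err > -dc then err - dc else err) + dr
                  else (if 2 * err > -dc then err - dc else err)) = err := by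
      split_ifs at herr ⊢ <;> linarith
    have hcast : ((n + 1 : Nat) : Int) = (n : Int) + 1 := by push_cast; ring
    rw [hcast]
    simp only [pvLoopA]
    rw [if_neg hstop, hr', hc', herr']
    have e1 : r + rs * ((n : Int) + 1) = (r + rs) + rs * (n : Int) := by ring
    have e2 : c + cs * ((n : Int) + 1) = (c + cs) + cs * (n : Int) := by ring
    rw [e1, e2, ih f (by omega) (r + rs) (c + cs) (cells ++ [(r, c)])]
    rw [List.append_assoc]
    congr 1
    conv_rhs => rw [List.range_succ_eq_map]
    rw [List.map_cons, List.map_map]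
    simp only [Nat.cast_zero, mul_zero, add_zero, List.singleton_append]
    congr 1
    apply List.map_congr_left
    intro i _
    simp only [Function.comp, Nat.succ_eq_add_one, Prod.mk.injEq]
    push_cast
    constructor <;> ring

-- The closed-form list of A's walk is exactly B's comprehension over pyRange.
theorem pv_closed (r c rs cs : Int) (n : Nat) :
    (List.range (n + 1)).map (fun i : Nat => (r + rs * (i : Int), c + cs * (i : Int)))
      = (PySem.List.pyRange 0 ((n : Int) + 1) 1).map (fun i => (r + i * rs, c + i * cs)) := by
  rw [PySem.List.pyRange_one]
  have h : (((n : Int) + 1) - 0).toNat = n + 1 := by omega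
  rw [h, List.map_map]
  apply List.map_congr_left
  intro i _
  simp only [Function.comp, Prod.mk.injEq]
  constructor <;> ring

-- ===== VERDICT (by name: the statement is the Claim_ definition above) =====
theorem get_line_cells_py_spec : Claim_equal_get_line_cells_py := by
  intro start end_ _
  obtain ⟨r1, c1⟩ := start
  obtain ⟨r2, c2⟩ := end_
  unfold Spec_get_line_cells_py get_line_cells_py get_line_cells_py_alt
  simp only []
  by_cases hg : r1 = r2 ∨ c1 = c2 ∨ |r2 - r1| = |c2 - c1|
  · rw [if_neg (not_not_intro hg), if_neg (not_not_intro hg)]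
    by_cases hr12 : r1 = r2 <;> by_cases hc12 : c1 = c2
    · -- start = end
      subst hr12; subst hc12
      simp [pvLoopA, sub_self]
    · -- horizontal line
      subst hr12
      have hne : c2 - c1 ≠ 0 := sub_ne_zero.mpr (fun h => hc12 h.symm)
      have hd : 0 < |c2 - c1| := abs_pos.mpr hne
      simp only [sub_self, abs_zero]
      set d := |c2 - c1| with hdd
      set sc : Int := if c2 > c1 then 1 else -1 with hscc
      have hsc0 : sc ≠ 0 := by rw [hscc]; split <;> norm_num
      have hsc : sc * d = c2 - c1 := by
        rcases lt_trichotomy c1 c2 with h | h | h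
        · rw [hscc, if_pos h, one_mul, hdd, abs_of_pos (by omega)]
        · exact absurd h hc12
        · rw [hscc, if_neg (by omega), hdd, abs_of_neg (by omega)]; ring
      have hmax : max (0 : Int) d = d := max_eq_right hd.le
      rw [hmax]
      have hn : c2 = c1 + sc * ((d.toNat : Int)) := by
        rw [Int.toNat_of_nonneg hd.le]; omega
      have hA := pvLoopA_linear 0 d (if r1 > r1 then 1 else -1) sc (0 - d) 0 sc
        (by rw [if_neg (by omega)]) (by rw [if_pos (by omega)])
        (by split_ifs <;> omega) (Or.inr hsc0)
        d.toNat (d.toNat + 1) (by omega) r1 c1 []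
      simp only [zero_mul, add_zero] at hA
      rw [← hn] at hA
      rw [hA, List.nil_append]
      -- B side
      rw [if_neg (by omega)]
      have hzero : PySem.Int.floordiv 0 d = 0 := by simp [PySem.Int.floordiv]
      have hcs : PySem.Int.floordiv (c2 - c1) d = sc := by
        rw [← hsc]; simp only [PySem.Int.floordiv]; exact Int.mul_fdiv_cancel _ (by omega)
      have hdn : d = ((d.toNat : Nat) : Int) := by omega
      rw [hzero, hcs, hdn]
      have hpc := pv_closed r1 c1 0 sc d.toNat
      simp only [zero_mul, mul_zero, add_zero] at hpc ⊢
      exact hpc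
    · -- vertical line
      subst hc12
      have hne : r2 - r1 ≠ 0 := sub_ne_zero.mpr (fun h => hr12 h.symm)
      have hd : 0 < |r2 - r1| := abs_pos.mpr hne
      simp only [sub_self, abs_zero]
      set d := |r2 - r1| with hdd
      set sr : Int := if r2 > r1 then 1 else -1 with hsrr
      have hsr0 : sr ≠ 0 := by rw [hsrr]; split <;> norm_num
      have hsr : sr * d = r2 - r1 := by
        rcases lt_trichotomy r1 r2 with h | h | h
        · rw [hsrr, if_pos h, one_mul, hdd, abs_of_pos (by omega)]
        · exact absurd h hr12
        · rw [hsrr, if_neg (by omega), hdd, abs_of_neg (by omega)]; ring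
      have hmax : max d (0 : Int) = d := max_eq_left hd.le
      rw [hmax]
      have hn : r2 = r1 + sr * ((d.toNat : Int)) := by
        rw [Int.toNat_of_nonneg hd.le]; omega
      have hA := pvLoopA_linear d 0 sr (if c1 > c1 then 1 else -1) (d - 0) sr 0
        (by rw [if_pos (by omega)]) (by rw [if_neg (by omega)])
        (by split_ifs <;> omega) (Or.inl hsr0)
        d.toNat (d.toNat + 1) (by omega) r1 c1 []
      simp only [zero_mul, add_zero] at hA
      rw [← hn] at hA
      rw [hA, List.nil_append]
      -- B side
      rw [if_neg (by omega)]
      have hzero : PySem.Int.floordiv 0 d = 0 := by simp [PySem.Int.floordiv]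
      have hrs : PySem.Int.floordiv (r2 - r1) d = sr := by
        rw [← hsr]; simp only [PySem.Int.floordiv]; exact Int.mul_fdiv_cancel _ (by omega)
      have hdn : d = ((d.toNat : Nat) : Int) := by omega
      rw [hzero, hrs, hdn]
      have hpc := pv_closed r1 c1 sr 0 d.toNat
      simp only [zero_mul, mul_zero, add_zero] at hpc ⊢
      exact hpc
    · -- diagonal line
      have hdd' : |r2 - r1| = |c2 - c1| := by tauto
      have hner : r2 - r1 ≠ 0 := sub_ne_zero.mpr (fun h => hr12 h.symm)
      have hd : 0 < |r2 - r1| := abs_pos.mpr hner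
      set d := |r2 - r1| with hdd
      rw [← hdd']
      set sr : Int := if r2 > r1 then 1 else -1 with hsrr
      set sc : Int := if c2 > c1 then 1 else -1 with hscc
      have hsr0 : sr ≠ 0 := by rw [hsrr]; split <;> norm_num
      have hsr : sr * d = r2 - r1 := by
        rcases lt_trichotomy r1 r2 with h | h | h
        · rw [hsrr, if_pos h, one_mul, hdd, abs_of_pos (by omega)]
        · exact absurd h hr12
        · rw [hsrr, if_neg (by omega), hdd, abs_of_neg (by omega)]; ring
      have hsc : sc * d = c2 - c1 := by
        have habs : |c2 - c1| = d := hdd'.symm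
        rcases lt_trichotomy c1 c2 with h | h | h
        · rw [hscc, if_pos h, one_mul, ← habs, abs_of_pos (by omega)]
        · exact absurd h hc12
        · rw [hscc, if_neg (by omega), ← habs, abs_of_neg (by omega)]; ring
      have hmax : max d d = d := max_self d
      rw [hmax]
      have hnr : r2 = r1 + sr * ((d.toNat : Int)) := by
        rw [Int.toNat_of_nonneg hd.le]; omega
      have hnc : c2 = c1 + sc * ((d.toNat : Int)) := by
        rw [Int.toNat_of_nonneg hd.le]; omega
      have hA := pvLoopA_linear d d sr sc (d - d) sr sc
        (by rw [if_pos (by omega)]) (by rw [if_pos (by omega)])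
        (by split_ifs <;> omega) (Or.inl hsr0)
        d.toNat (d.toNat + 1) (by omega) r1 c1 []
      rw [← hnr, ← hnc] at hA
      rw [hA, List.nil_append]
      -- B side
      rw [if_neg (by omega)]
      have hrs : PySem.Int.floordiv (r2 - r1) d = sr := by
        rw [← hsr]; simp only [PySem.Int.floordiv]; exact Int.mul_fdiv_cancel _ (by omega)
      have hcs : PySem.Int.floordiv (c2 - c1) d = sc := by
        rw [← hsc]; simp only [PySem.Int.floordiv]; exact Int.mul_fdiv_cancel _ (by omega)
      rw [hrs, hcs]
      have hdn : d = ((d.toNat : Nat) : Int) := by omega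
      rw [hdn]
      exact pv_closed r1 c1 sr sc d.toNat
  · rw [if_pos hg, if_pos hg]
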